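-- pv_equiv track=rewrite | github.com/SansPapyrus683/usaco-solutions | section3/part1/humble/arrogant.py | humble
-- ===== SOURCE A (Python) =====
-- def humble(n, primes):
--     h = [1] * (n + 1)  # n + 1 because the first element will be like [1 ....]
--     primeCounters = {p: p for p in primes}  # and 1 isn't a humble
--     expCounters = {p: 0 for p in primes}
--     for n in range(1, n+1):
--         h[n] = min(primeCounters.values())
--         for p, c in primeCounters.items():
--             if c == h[n]:
--                 expCounters[p] += 1
--                 primeCounters[p] = p * h[expCounters[p]]
--     return h[-1]
-- ===== SOURCE B (Python) =====
-- def humble(n, primes):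
--     # Ordered candidate queue of (candidate, prime) pairs kept sorted in
--     # DESCENDING lexicographic order, so the minimal candidate sits at the
--     # end: each step pops the run of minimal candidates off the end and
--     # re-inserts their advanced successors by binary search, instead of a
--     # linear min over all primes followed by a full dict scan.
--     ps = list(dict.fromkeys(primes))
--     exp = {p: 0 for p in ps}
--     h = [1]
--     q = []
--     for p in ps:
--         _insort_desc(q, (p, p))
--     for _ in range(n):
--         m = q[-1][0]
--         h.append(m)
--         run = []
--         while q and q[-1][0] == m:
--             run.append(q.pop()[1])
--         for p in run:
--             exp[p] += 1
--             _insort_desc(q, (p * h[exp[p]], p))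
--     return h[-1]
--
--
-- def _insort_desc(q, x):
--     # insert x into q, which is sorted in descending order
--     lo, hi = 0, len(q)
--     while lo < hi:
--         mid = (lo + hi) // 2
--         if x < q[mid]:
--             lo = mid + 1
--         else:
--             hi = mid
--     q.insert(lo, x)
-- ===== Notes on version B (the rewrite author's own statement) =====
-- stated objective: alternative
-- what changed: B replaces A's per-step linear minimum over all prime counters plus a full dict scan by an ordered candidate queue (sorted descending, minimum at the end) with binary-search insertion and run-popping of tied candidates.
import Mathlib
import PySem

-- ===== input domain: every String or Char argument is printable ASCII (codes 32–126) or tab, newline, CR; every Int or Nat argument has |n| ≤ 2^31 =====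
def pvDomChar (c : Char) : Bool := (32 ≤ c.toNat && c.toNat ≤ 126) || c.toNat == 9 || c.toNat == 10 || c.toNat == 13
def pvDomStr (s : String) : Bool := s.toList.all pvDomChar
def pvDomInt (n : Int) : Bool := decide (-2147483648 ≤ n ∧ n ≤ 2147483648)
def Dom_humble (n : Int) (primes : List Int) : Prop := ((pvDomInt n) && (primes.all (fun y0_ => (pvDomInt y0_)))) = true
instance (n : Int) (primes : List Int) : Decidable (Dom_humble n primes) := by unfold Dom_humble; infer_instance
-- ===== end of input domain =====

-- B replaces A's per-step linear min over all primes plus a full dict scan by an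
-- ordered candidate queue with binary-search insertion; equal return value on Pre_.

-- ===== PORT A =====
-- Literal port of A.  A's inner loop iterates over primeCounters.items() while only
-- WRITING values at the key currently visited, so it is exactly a fold over the
-- items snapshot taken at loop entry (each key is visited once, and a key's value
-- is only modified during its own visit).  The loop bodies are named helpers.
def humbleInner (m : Int) (h : List Int)
    (s : PySem.Dict Int Int × PySem.Dict Int Int) (pc : Int × Int) :
    PySem.Dict Int Int × PySem.Dict Int Int :=
  if pc.2 = m then
    let ec := s.2.modify pc.1 0 (· + 1)
    -- h[expCounters[p]]: in range on every iteration Python reaches (exp ≤ step count)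
    (s.1.insert pc.1 (pc.1 * PySem.List.pyGetD h (ec.getD pc.1 0) 0), ec)
  else s

def humbleStep (st : List Int × PySem.Dict Int Int × PySem.Dict Int Int) (i : Int) :
    List Int × PySem.Dict Int Int × PySem.Dict Int Int :=
  -- min() of an empty sequence raises ValueError: those inputs are outside Pre_
  let m := (PySem.List.min? st.2.1.values (fun v => v)).getD 0
  let h := PySem.List.pySetD st.1 i m
  let inner := st.2.1.items.foldl (humbleInner m h) (st.2.1, st.2.2)
  (h, inner.1, inner.2)

def humble (n : Int) (primes : List Int) : Int :=
  let h0 : List Int := PySem.List.pyRepeat [(1 : Int)] (n + 1)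
  let pc0 : PySem.Dict Int Int := primes.foldl (fun d p => d.insert p p) (PySem.Dict.mk [])
  let ec0 : PySem.Dict Int Int := primes.foldl (fun d p => d.insert p 0) (PySem.Dict.mk [])
  let st := (PySem.List.pyRange 1 (n + 1) 1).foldl humbleStep (h0, pc0, ec0)
  -- h[-1]: IndexError on the empty list (n < 0): outside Pre_
  PySem.List.pyGetD st.1 (-1) 0

-- ===== PORT B =====
-- Python tuple comparison (c1, p1) < (c2, p2) on int pairs
def humblePairLt (a b : Int × Int) : Bool :=
  decide (a.1 < b.1) || (decide (a.1 = b.1) && decide (a.2 < b.2))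

-- the binary-search loop of _insort_desc (q sorted descending; lo/hi are Nat indices)
def humbleInsPos (q : List (Int × Int)) (x : Int × Int) (lo hi : Nat) : Nat :=
  if h : lo < hi then
    let mid := (lo + hi) / 2
    if humblePairLt x (q.getD mid (0, 0)) then humbleInsPos q x (mid + 1) hi
    else humbleInsPos q x lo mid
  else lo
termination_by hi - lo
decreasing_by
  · omega
  · omega

def humbleInsort (q : List (Int × Int)) (x : Int × Int) : List (Int × Int) :=
  PySem.List.insert q (humbleInsPos q x 0 q.length) x

-- the `while q and q[-1][0] == m: run.append(q.pop()[1])` loop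
def humblePopRun (m : Int) (q : List (Int × Int)) (run : List Int) : List Int × List (Int × Int) :=
  match hq : q.getLast? with
  | some x =>
      if x.1 = m then humblePopRun m q.dropLast (run ++ [x.2]) else (run, q)
  | none => (run, q)
termination_by q.length
decreasing_by
  have : q ≠ [] := by intro h; subst h; simp at hq
  have h1 : q.dropLast.length = q.length - 1 := List.length_dropLast
  have h2 : 0 < q.length := List.length_pos_iff.mpr this
  omega

def humbleAltInner (h : List Int)
    (s : PySem.Dict Int Int × List (Int × Int)) (p : Int) :
    PySem.Dict Int Int × List (Int × Int) :=
  let exp := s.1.modify p 0 (· + 1)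
  -- h[exp[p]]: in range on every iteration Python reaches
  (exp, humbleInsort s.2 (p * PySem.List.pyGetD h (exp.getD p 0) 0, p))

def humbleAltStep (st : List Int × PySem.Dict Int Int × List (Int × Int)) (_i : Int) :
    List Int × PySem.Dict Int Int × List (Int × Int) :=
  -- q[-1] raises IndexError on an empty queue: outside Pre_
  let m := (PySem.List.pyGetD st.2.2 (-1) ((0 : Int), (0 : Int))).1
  let h := st.1 ++ [m]
  let pr := humblePopRun m st.2.2 []
  let inner := pr.1.foldl (humbleAltInner h) (st.2.1, pr.2)
  (h, inner.1, inner.2)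

def humble_alt (n : Int) (primes : List Int) : Int :=
  let ps := PySem.List.dedup primes
  let exp0 : PySem.Dict Int Int := ps.foldl (fun d p => d.insert p 0) (PySem.Dict.mk [])
  let q0 : List (Int × Int) := ps.foldl (fun q p => humbleInsort q (p, p)) []
  let st := (PySem.List.pyRange 0 n 1).foldl humbleAltStep ([(1 : Int)], exp0, q0)
  PySem.List.pyGetD st.1 (-1) 0

-- ===== PRECONDITION & SPEC =====
-- Pre_ excludes exactly the inputs where A raises: n < 0 (h[-1] on the empty list,
-- IndexError) and n ≥ 1 with no primes (min() of an empty sequence, ValueError).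
def Pre_humble (n : Int) (primes : List Int) : Prop := 0 ≤ n ∧ (n = 0 ∨ primes ≠ [])
instance (n : Int) (primes : List Int) : Decidable (Pre_humble n primes) := by
  unfold Pre_humble; infer_instance

def pvWitness_humble : Int × List Int := (6, [2, 3, 5])

def Spec_humble (n : Int) (primes : List Int) (out : Int) : Prop := out = humble_alt n primes
instance (n : Int) (primes : List Int) (out : Int) : Decidable (Spec_humble n primes out) := by
  unfold Spec_humble; infer_instance

-- ===== CLAIM (what is proved, stated in full; the proofs are below) =====
def Claim_equal_humble : Prop := ∀ (n : Int) (primes : List Int), Dom_humble n primes → Pre_humble n primes → Spec_humble n primes (humble n primes)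

-- ===== LEMMAS AND PROOFS =====

-- ========== reference iteration (proof-side) ==========
def pvCand (H : List Int) (ke : Int × Int) : Int := ke.1 * PySem.List.pyGetD H ke.2 0

def pvPair (H : List Int) (ke : Int × Int) : Int × Int := (pvCand H ke, ke.1)

def pvM (H : List Int) (E : List (Int × Int)) : Int :=
  (PySem.List.min? (E.map (pvCand H)) (fun v => v)).getD 0

def pvUpd (H : List Int) (m : Int) (ke : Int × Int) : Int × Int :=
  if pvCand H ke = m then (ke.1, ke.2 + 1) else ke

def pvIter (ks : List Int) : Nat → List (Int × Int) × List Int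
  | 0 => (ks.map (fun k => (k, 0)), [1])
  | t + 1 =>
      let s := pvIter ks t
      let m := pvM s.2 s.1
      (s.1.map (pvUpd s.2 m), s.2 ++ [m])

lemma pvUpd_fst (H : List Int) (m : Int) (ke : Int × Int) : (pvUpd H m ke).1 = ke.1 := by
  unfold pvUpd; split <;> rfl

lemma pvIter_fst (ks : List Int) (t : Nat) : ((pvIter ks t).1).map Prod.fst = ks := by
  induction t with
  | zero => simp [pvIter, Function.comp_def]
  | succ t ih => simp [pvIter, List.map_map, Function.comp_def, pvUpd_fst]; simpa using ih

lemma pvIter_len (ks : List Int) (t : Nat) : ((pvIter ks t).2).length = t + 1 := by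
  induction t with
  | zero => simp [pvIter]
  | succ t ih => simp [pvIter, ih]

lemma pvIter_exp (ks : List Int) (t : Nat) :
    ∀ ke ∈ (pvIter ks t).1, 0 ≤ ke.2 ∧ ke.2.toNat ≤ t := by
  induction t with
  | zero => intro ke hke; simp [pvIter] at hke; obtain ⟨k, _, rfl⟩ := hke; simp
  | succ t ih =>
      intro ke hke
      simp only [pvIter, List.mem_map] at hke
      obtain ⟨ke0, hke0, rfl⟩ := hke
      have := ih ke0 hke0
      unfold pvUpd; split <;> simp <;> omega

lemma pvGetD_prefix (H xs : List Int) (e : Int) (h0 : 0 ≤ e) (h1 : e.toNat < H.length) :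
    PySem.List.pyGetD (H ++ xs) e 0 = PySem.List.pyGetD H e 0 := by
  have h1' : e < (H : List Int).length := by omega
  rw [PySem.List.pyGetD_eq_getElem _ _ h0 (by simp; omega),
      PySem.List.pyGetD_eq_getElem _ _ h0 (by exact_mod_cast h1')]
  exact List.getElem_append_left h1

lemma pvCand_prefix (H xs : List Int) (ke : Int × Int) (h0 : 0 ≤ ke.2)
    (h1 : ke.2.toNat < H.length) : pvCand (H ++ xs) ke = pvCand H ke := by
  unfold pvCand; rw [pvGetD_prefix _ _ _ h0 h1]

-- ========== dict helpers ==========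
lemma pvMapNoop (l : List (Int × Int)) (k : Int) (v : Int) (h : k ∉ l.map Prod.fst) :
    l.map (fun p => if (p.1 == k) = true then (k, v) else p) = l := by
  induction l with
  | nil => rfl
  | cons a l ih =>
      have ha : ¬ (a.1 == k) = true := by
        simp only [beq_iff_eq]; intro hak; exact h (by simp [← hak])
      have hl : k ∉ l.map Prod.fst := fun hm => h (by simp [List.mem_map] at hm ⊢; tauto)
      simp only [List.map_cons, if_neg ha, ih hl]

lemma pvMkKeys (E : List (Int × Int)) : (PySem.Dict.mk E).keys = E.map Prod.fst := by
  simp [PySem.Dict.keys]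

lemma pvGetD_mid (P R : List (Int × Int)) (k e : Int)
    (hnd : ((P ++ (k, e) :: R).map Prod.fst).Nodup) :
    (PySem.Dict.mk (P ++ (k, e) :: R)).getD k 0 = e := by
  exact PySem.Dict.getD_of_mem_items _ (by simp) (by rw [pvMkKeys]; exact hnd) 0

lemma pvInsert_mid (P R : List (Int × Int)) (k v w : Int)
    (hnd : ((P ++ (k, v) :: R).map Prod.fst).Nodup) :
    (PySem.Dict.mk (P ++ (k, v) :: R)).insert k w = PySem.Dict.mk (P ++ (k, w) :: R) := by
  have hc : (PySem.Dict.mk (P ++ (k, v) :: R)).contains k = true := by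
    rw [PySem.Dict.contains_iff_mem_keys, pvMkKeys]; simp
  apply PySem.Dict.ext
  rw [PySem.Dict.items_insert_of_contains _ _ hc]
  have hnd' := hnd
  simp only [List.map_append, List.map_cons, List.nodup_append, List.nodup_cons] at hnd'
  have hP : k ∉ P.map Prod.fst := fun hm => hnd'.2.2 _ hm _ (by simp) rfl
  have hR : k ∉ R.map Prod.fst := hnd'.2.1.1
  show (P ++ (k, v) :: R).map (fun p => if (p.1 == k) = true then (k, w) else p) = _
  rw [List.map_append, List.map_cons]
  rw [pvMapNoop _ _ _ hP, pvMapNoop _ _ _ hR]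
  simp

lemma pvModify_mid (P R : List (Int × Int)) (k e : Int)
    (hnd : ((P ++ (k, e) :: R).map Prod.fst).Nodup) :
    (PySem.Dict.mk (P ++ (k, e) :: R)).modify k 0 (· + 1) = PySem.Dict.mk (P ++ (k, e + 1) :: R) := by
  show (PySem.Dict.mk (P ++ (k, e) :: R)).insert k _ = _
  rw [pvGetD_mid _ _ _ _ hnd, pvInsert_mid _ _ _ _ _ hnd]


-- ========== A side ==========
lemma pvInitDict (f : Int → Int) (l : List Int) :
    l.foldl (fun d p => d.insert p (f p)) (PySem.Dict.mk []) =
      PySem.Dict.mk ((PySem.List.dedup l).map (fun k => (k, f k))) := by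
  induction l using List.reverseRecOn with
  | nil => rfl
  | append_singleton xs x ih =>
      rw [List.foldl_append, List.foldl_cons, List.foldl_nil, ih]
      rw [show PySem.List.dedup (xs ++ [x]) = PySem.Set.add (PySem.List.dedup xs) x by
        rw [PySem.List.dedup_eq_ofList, PySem.List.dedup_eq_ofList,
          PySem.Set.ofList_append_singleton]]
      by_cases hx : x ∈ PySem.List.dedup xs
      · rw [PySem.Set.add_of_mem hx]
        have hc : (PySem.Dict.mk ((PySem.List.dedup xs).map (fun k => (k, f k)))).contains x = true := by
          rw [PySem.Dict.contains_iff_mem_keys, pvMkKeys]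
          simp only [List.map_map]
          simpa [Function.comp_def] using hx
        apply PySem.Dict.ext
        rw [PySem.Dict.items_insert_of_contains _ _ hc]
        show ((PySem.List.dedup xs).map _).map _ = _
        rw [List.map_map]
        apply List.map_congr_left
        intro k _
        simp only [Function.comp_def, beq_iff_eq]
        split
        · next hk => subst hk; rfl
        · rfl
      · rw [PySem.Set.add_of_not_mem hx]
        have hc : (PySem.Dict.mk ((PySem.List.dedup xs).map (fun k => (k, f k)))).contains x = false := by
          rw [← Bool.not_eq_true, PySem.Dict.contains_iff_mem_keys, pvMkKeys]
          simp only [List.map_map]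
          simpa [Function.comp_def] using hx
        apply PySem.Dict.ext
        rw [PySem.Dict.items_insert_of_not_contains _ _ hc]
        show (PySem.List.dedup xs).map _ ++ _ = _
        rw [List.map_append]
        rfl

lemma pvInnerA (H h2 : List Int) (m : Int) :
    ∀ (X PP P : List (Int × Int)),
      PP.map Prod.fst = P.map Prod.fst →
      ((P ++ X).map Prod.fst).Nodup →
      (X.map (fun ke => (ke.1, pvCand H ke))).foldl (humbleInner m h2)
        (PySem.Dict.mk (PP ++ X.map (fun ke => (ke.1, pvCand H ke))), PySem.Dict.mk (P ++ X))
      = (PySem.Dict.mk (PP ++ X.map (fun ke =>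
            (ke.1, if pvCand H ke = m then ke.1 * PySem.List.pyGetD h2 (ke.2 + 1) 0
                   else pvCand H ke))),
         PySem.Dict.mk (P ++ X.map (pvUpd H m))) := by
  intro X
  induction X with
  | nil => intro PP P _ _; simp
  | cons ke X ih =>
      intro PP P hfst hnd
      obtain ⟨k, e⟩ := ke
      have hndk : ((P ++ (k, e) :: X).map Prod.fst).Nodup := hnd
      have hndPPk : ((PP ++ ((k, pvCand H (k, e))) :: X.map (fun ke => (ke.1, pvCand H ke))).map Prod.fst).Nodup := by
        have : (PP ++ ((k, pvCand H (k, e))) :: X.map (fun ke => (ke.1, pvCand H ke))).map Prod.fst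
            = (P ++ (k, e) :: X).map Prod.fst := by
          simp [hfst, List.map_map, Function.comp_def]
        rw [this]; exact hnd
      simp only [List.map_cons, List.foldl_cons]
      by_cases hm : pvCand H (k, e) = m
      · rw [show humbleInner m h2
            (PySem.Dict.mk (PP ++ ((k, pvCand H (k,e))) :: X.map (fun ke => (ke.1, pvCand H ke))),
             PySem.Dict.mk (P ++ (k, e) :: X)) ((k, e).1, pvCand H (k, e))
            = (PySem.Dict.mk ((PP ++ [(k, k * PySem.List.pyGetD h2 (e + 1) 0)]) ++ X.map (fun ke => (ke.1, pvCand H ke))),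
               PySem.Dict.mk ((P ++ [(k, e + 1)]) ++ X)) from ?_]
        · rw [ih _ _ (by simp [hfst]) (by simpa using hndk)]
          simp only [pvUpd, if_pos hm, List.append_assoc, List.cons_append, List.nil_append]
        · unfold humbleInner
          rw [if_pos (by simpa using hm)]
          have hmd := pvModify_mid P X k e hndk
          simp only at hmd ⊢
          rw [hmd]
          have hgd : (PySem.Dict.mk (P ++ (k, e + 1) :: X)).getD k 0 = e + 1 :=
            pvGetD_mid P X k (e + 1) (by simpa using hndk)
          rw [hgd]
          have hins := pvInsert_mid PP (X.map (fun ke => (ke.1, pvCand H ke))) k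
            (pvCand H (k, e)) (k * PySem.List.pyGetD h2 (e + 1) 0) hndPPk
          simp only at hins ⊢
          rw [hins]
          simp
      · rw [show humbleInner m h2
            (PySem.Dict.mk (PP ++ ((k, pvCand H (k,e))) :: X.map (fun ke => (ke.1, pvCand H ke))),
             PySem.Dict.mk (P ++ (k, e) :: X)) ((k, e).1, pvCand H (k, e))
            = (PySem.Dict.mk ((PP ++ [(k, pvCand H (k, e))]) ++ X.map (fun ke => (ke.1, pvCand H ke))),
               PySem.Dict.mk ((P ++ [(k, e)]) ++ X)) from ?_]
        · rw [ih _ _ (by simp [hfst]) (by simpa using hndk)]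
          simp only [pvUpd, if_neg hm, List.append_assoc, List.cons_append, List.nil_append]
        · unfold humbleInner
          rw [if_neg (by simpa using hm)]
          simp

lemma pvSetMid (l1 l2 : List Int) (x v : Int) :
    (l1 ++ x :: l2).set l1.length v = l1 ++ v :: l2 := by
  induction l1 with
  | nil => rfl
  | cons a l1 ih => simp [List.set_cons_succ, ih]

def pvAState (ks : List Int) (N t : Nat) :
    List Int × PySem.Dict Int Int × PySem.Dict Int Int :=
  ((pvIter ks t).2 ++ List.replicate (N - t) 1,
   PySem.Dict.mk (((pvIter ks t).1).map (fun ke => (ke.1, pvCand (pvIter ks t).2 ke))),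
   PySem.Dict.mk (pvIter ks t).1)

lemma pvStepA (ks : List Int) (hnd : ks.Nodup) (t N : Nat) (ht : t < N) :
    humbleStep (pvAState ks N t) ((t : Int) + 1) = pvAState ks N (t + 1) := by
  have hE : ((pvIter ks t).1).map Prod.fst = ks := pvIter_fst ks t
  have hH : ((pvIter ks t).2).length = t + 1 := pvIter_len ks t
  unfold humbleStep pvAState
  simp only []
  set E := (pvIter ks t).1 with hEdef
  set H := (pvIter ks t).2 with hHdef
  -- the minimum is pvM
  have hval : (PySem.Dict.mk (E.map (fun ke => (ke.1, pvCand H ke)))).values = E.map (pvCand H) := by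
    show (E.map _).map _ = _
    simp [List.map_map, Function.comp_def]
  have hm : (PySem.List.min? (PySem.Dict.mk (E.map (fun ke => (ke.1, pvCand H ke)))).values
      (fun v => v)).getD 0 = pvM H E := by
    rw [hval]; rfl
  rw [hm]
  -- the h update
  have hset : PySem.List.pySetD (H ++ List.replicate (N - t) 1) ((t : Int) + 1) (pvM H E)
      = (H ++ [pvM H E]) ++ List.replicate (N - (t + 1)) 1 := by
    have : ((t : Int) + 1) = ((t + 1 : Nat) : Int) := by push_cast; ring
    rw [this, PySem.List.pySetD_natCast]
    have hrep : List.replicate (N - t) (1 : Int) = 1 :: List.replicate (N - (t + 1)) 1 := by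
      have : N - t = (N - (t + 1)) + 1 := by omega
      rw [this, List.replicate_succ]
    rw [hrep, ← hH, pvSetMid]
    simp
  rw [hset]
  -- the inner fold
  have hfold := pvInnerA H ((H ++ [pvM H E]) ++ List.replicate (N - (t + 1)) 1) (pvM H E)
    E [] [] rfl (by simpa [hE] using hnd)
  simp only [List.nil_append] at hfold
  rw [hfold]
  -- identify with pvIter (t+1)
  have hiter : pvIter ks (t + 1) = (E.map (pvUpd H (pvM H E)), H ++ [pvM H E]) := by
    simp [pvIter, ← hEdef, ← hHdef]
  rw [hiter]
  simp only [Prod.mk.injEq]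
  refine ⟨trivial, ?_, trivial⟩
  -- pc items agree
  congr 1
  rw [List.map_map]
  apply List.map_congr_left
  intro ke hke
  have hexp := pvIter_exp ks t ke (by rw [hEdef] at hke; exact hke)
  have hstab1 : PySem.List.pyGetD (H ++ [pvM H E] ++ List.replicate (N - (t + 1)) 1) (ke.2 + 1) 0
      = PySem.List.pyGetD (H ++ [pvM H E]) (ke.2 + 1) 0 :=
    pvGetD_prefix _ _ _ (by omega) (by simp; omega)
  have hstab2 : PySem.List.pyGetD (H ++ [pvM H E]) ke.2 0 = PySem.List.pyGetD H ke.2 0 :=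
    pvGetD_prefix _ _ _ (by omega) (by omega)
  by_cases hc : pvCand H ke = pvM H E
  · simp only [Function.comp_def]
    unfold pvUpd
    rw [if_pos hc, if_pos hc, hstab1]
    simp [pvCand]
  · simp only [Function.comp_def]
    unfold pvUpd
    rw [if_neg hc, if_neg hc]
    simp [pvCand, hstab2]

lemma pvLoopA (ks : List Int) (hnd : ks.Nodup) (N : Nat) :
    ∀ d t, t + d = N →
      (PySem.List.pyRange ((t : Int) + 1) ((N : Int) + 1) 1).foldl humbleStep (pvAState ks N t)
        = pvAState ks N N := by
  intro d
  induction d with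
  | zero =>
      intro t htd
      have : t = N := by omega
      subst this
      rw [PySem.List.pyRange_one_eq_nil (by omega)]
      rfl
  | succ d ih =>
      intro t htd
      rw [PySem.List.pyRange_one_cons (by omega), List.foldl_cons]
      rw [pvStepA ks hnd t N (by omega)]
      have := ih (t + 1) (by omega)
      rw [show ((t + 1 : Nat) : Int) + 1 = (t : Int) + 1 + 1 by omega] at this
      exact this

-- ========== B side: the ordered queue ==========
lemma pvLt_iff (a b : Int × Int) :
    humblePairLt a b = true ↔ (a.1 < b.1 ∨ (a.1 = b.1 ∧ a.2 < b.2)) := by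
  unfold humblePairLt
  simp [Bool.or_eq_true, Bool.and_eq_true]

lemma pvLt_trans {a b c : Int × Int} (h1 : humblePairLt a b = true)
    (h2 : humblePairLt b c = true) : humblePairLt a c = true := by
  rw [pvLt_iff] at *; omega

lemma pvLt_of_not_of_ne {a b : Int × Int} (h : humblePairLt a b = false)
    (hne : a.2 ≠ b.2) : humblePairLt b a = true := by
  rw [← Bool.not_eq_true, pvLt_iff] at h; rw [pvLt_iff]; omega

-- the strict-descending invariant of B's queue
def pvDesc (q : List (Int × Int)) : Prop := q.Pairwise (fun a b => humblePairLt b a = true)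

lemma pvInsPos_spec (q : List (Int × Int)) (x : Int × Int) (hdesc : pvDesc q) :
    ∀ fuel lo hi, hi - lo ≤ fuel → lo ≤ hi → hi ≤ q.length →
      (∀ j (hj : j < q.length), j < lo → humblePairLt x q[j] = true) →
      (∀ j (hj : j < q.length), hi ≤ j → humblePairLt x q[j] = false) →
      lo ≤ humbleInsPos q x lo hi ∧ humbleInsPos q x lo hi ≤ hi ∧
      (∀ j (hj : j < q.length), j < humbleInsPos q x lo hi → humblePairLt x q[j] = true) ∧
      (∀ j (hj : j < q.length), humbleInsPos q x lo hi ≤ j → humblePairLt x q[j] = false) := by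
  intro fuel
  induction fuel with
  | zero =>
      intro lo hi hfuel hlohi hhi hlo hhi2
      have : lo = hi := by omega
      subst this
      rw [humbleInsPos, dif_neg (by omega)]
      exact ⟨le_refl _, le_refl _, hlo, hhi2⟩
  | succ fuel ih =>
      intro lo hi hfuel hlohi hhi hlo hhi2
      by_cases hlt : lo < hi
      · rw [humbleInsPos, dif_pos hlt]
        have hmid : (lo + hi) / 2 < q.length := by omega
        have hgd : q.getD ((lo + hi) / 2) (0, 0) = q[(lo + hi) / 2] :=
          List.getD_eq_getElem q (0, 0) hmid
        have hmono := List.pairwise_iff_getElem.mp hdesc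
        by_cases hc : humblePairLt x (q.getD ((lo + hi) / 2) (0, 0)) = true
        · rw [if_pos hc]
          refine (ih ((lo + hi) / 2 + 1) hi (by omega) (by omega) hhi ?_ hhi2).imp
            (by omega) (fun h => h)
          intro j hj hjlt
          by_cases hjlo : j < lo
          · exact hlo j hj hjlo
          · rcases Nat.lt_or_ge j ((lo + hi) / 2) with hj2 | hj2
            · exact pvLt_trans (hgd ▸ hc) (hmono j ((lo + hi) / 2) hj hmid hj2)
            · have : j = (lo + hi) / 2 := by omega
              subst this; exact hgd ▸ hc
        · rw [if_neg hc]
          have hc' : humblePairLt x q[(lo + hi) / 2] = false := by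
            rw [← hgd]; exact Bool.not_eq_true _ ▸ hc
          refine (ih lo ((lo + hi) / 2) (by omega) (by omega) (by omega) hlo ?_).imp
            (fun h => h) (fun h => h.imp (by omega) (fun h => h))
          intro j hj hjge
          rcases Nat.lt_or_ge ((lo + hi) / 2) j with hj2 | hj2
          · have hlt2 := hmono ((lo + hi) / 2) j hmid hj hj2
            by_contra hxx
            rw [Bool.not_eq_false] at hxx
            have hcon := pvLt_trans hxx hlt2
            rw [hc'] at hcon
            exact absurd hcon (by simp)
          · have : j = (lo + hi) / 2 := by omega
            subst this; exact hc'
      · have heq : lo = hi := by omega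
        subst heq
        rw [humbleInsPos, dif_neg hlt]
        exact ⟨le_refl _, le_refl _, fun j hj hjlt => hlo j hj hjlt, hhi2⟩

lemma pvInsert_take_drop (q : List (Int × Int)) (k : Nat) (x : Int × Int) (hk : k ≤ q.length) :
    PySem.List.insert q (k : Int) x = q.take k ++ x :: q.drop k := by
  simp only [PySem.List.insert, PySem.List.sliceIndices]
  have h1 : ¬ ((k : Int) < 0) := by omega
  have h2 : (if (k : Int) < 0 then max ((k : Int) + (q.length : Int)) (if (1:Int) < 0 then -1 else 0)
      else min (k : Int) (if (1:Int) < 0 then (q.length : Int) - 1 else (q.length : Int))).toNat = k := by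
    norm_num
    omega
  rw [h2]

lemma pvInsort_spec (q : List (Int × Int)) (x : Int × Int) (hdesc : pvDesc q)
    (hx : ∀ y ∈ q, y.2 ≠ x.2) :
    pvDesc (humbleInsort q x) ∧ (humbleInsort q x).Perm (x :: q) := by
  obtain ⟨h1, h2, h3, h4⟩ := pvInsPos_spec q x hdesc q.length 0 q.length (by omega) (by omega)
    (le_refl _) (fun j hj hjlt => absurd hjlt (by omega)) (fun j hj hge => absurd hge (by omega))
  set pos := humbleInsPos q x 0 q.length with hposdef
  have hple : pos ≤ q.length := h2
  have hins : humbleInsort q x = q.take pos ++ x :: q.drop pos := by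
    unfold humbleInsort
    rw [← hposdef, pvInsert_take_drop q pos x hple]
  constructor
  · rw [hins]
    have hsplit : List.Pairwise (fun a b => humblePairLt b a = true) (q.take pos ++ q.drop pos) := by
      rw [List.take_append_drop]; exact hdesc
    rw [List.pairwise_append] at hsplit
    unfold pvDesc
    rw [List.pairwise_append]
    refine ⟨hsplit.1, ?_, ?_⟩
    · rw [List.pairwise_cons]
      refine ⟨?_, hsplit.2.1⟩
      intro y hy
      obtain ⟨i, hi, rfl⟩ := List.getElem_of_mem hy
      rw [List.getElem_drop] at *
      have hld := List.length_drop (i := pos) (l := q)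
      have hylen : pos + i < q.length := by omega
      have hfalse := h4 (pos + i) hylen (by omega)
      exact pvLt_of_not_of_ne hfalse (fun hxy => hx _ (List.getElem_mem hylen) hxy.symm)
    · intro a ha b hb
      rcases List.mem_cons.mp hb with rfl | hb
      · obtain ⟨i, hi, rfl⟩ := List.getElem_of_mem ha
        rw [List.getElem_take] at *
        have hl := List.length_take (i := pos) (l := q)
        exact h3 i (by omega) (by omega)
      · exact hsplit.2.2 a ha b hb
  · rw [hins]
    calc (q.take pos ++ x :: q.drop pos).Perm (x :: (q.take pos ++ q.drop pos)) :=
          List.perm_middle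
      _ = x :: q := by rw [List.take_append_drop]

lemma pvPopRun_spec (m : Int) :
    ∀ (r q1 : List (Int × Int)) (acc : List Int),
      (∀ y ∈ r, y.1 = m) → (∀ y ∈ q1.getLast?, y.1 ≠ m) →
      humblePopRun m (q1 ++ r) acc = (acc ++ r.reverse.map Prod.snd, q1) := by
  intro r
  induction r using List.reverseRecOn with
  | nil =>
      intro q1 acc _ hq1
      rw [List.append_nil, humblePopRun]
      cases hql : q1.getLast? with
      | none => simp
      | some y =>
          have hy := hq1 y (by rw [hql]; rfl)
          simp [hy]
  | append_singleton r x ih =>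
      intro q1 acc hr hq1
      rw [← List.append_assoc, humblePopRun]
      split
      · next x' heq =>
          rw [List.getLast?_concat] at heq
          obtain rfl : x = x' := Option.some.inj heq
          rw [if_pos (hr x (by simp)), List.dropLast_concat]
          rw [ih q1 (acc ++ [x.2]) (fun y hy => hr y (by simp [hy])) hq1]
          simp
      · next heq =>
          rw [List.getLast?_concat] at heq
          cases heq

lemma pvDesc_getLast_min (q : List (Int × Int)) (hdesc : pvDesc q) (hne : q ≠ []) :
    ∀ y ∈ q, (q.getLast hne).1 ≤ y.1 := by
  intro y hy
  obtain ⟨i, hi, rfl⟩ := List.getElem_of_mem hy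
  have hlast : q.getLast hne = q[q.length - 1] := List.getLast_eq_getElem hne
  rcases Nat.lt_or_ge i (q.length - 1) with hlt | hge
  · have := List.pairwise_iff_getElem.mp hdesc i (q.length - 1) hi (by omega) hlt
    rw [pvLt_iff] at this
    rw [hlast]
    omega
  · have : i = q.length - 1 := by omega
    subst this
    rw [hlast]

lemma pvM_eq (H : List Int) (E : List (Int × Int)) (q : List (Int × Int))
    (hperm : q.Perm (E.map (pvPair H))) (hdesc : pvDesc q) (hE : E ≠ []) :
    (PySem.List.pyGetD q (-1) ((0 : Int), (0 : Int))).1 = pvM H E := by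
  have hq : q ≠ [] := by
    intro h
    subst h
    have h0 := hperm.length_eq
    simp only [List.length_nil, List.length_map] at h0
    exact hE (List.length_eq_zero_iff.mp h0.symm)
  rw [PySem.List.pyGetD_neg_one q _ hq]
  have hmapne : E.map (pvCand H) ≠ [] := by simpa using hE
  obtain ⟨m0, hm0⟩ : ∃ m0, PySem.List.min? (E.map (pvCand H)) (fun v => v) = some m0 := by
    cases h : PySem.List.min? (E.map (pvCand H)) (fun v => v) with
    | none => exact absurd ((PySem.List.min?_eq_none_iff _ _).mp h) hmapne
    | some m0 => exact ⟨m0, rfl⟩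
  have hmin := PySem.List.min?_isMin hm0
  have hmem := PySem.List.min?_mem hm0
  unfold pvM
  rw [hm0, Option.getD_some]
  have hgl : q.getLast hq ∈ q := List.getLast_mem hq
  obtain ⟨ke, hkeE, hkeq⟩ := List.mem_map.mp ((hperm.mem_iff).mp hgl)
  have h1 : m0 ≤ (q.getLast hq).1 := by
    have hfst : (q.getLast hq).1 = pvCand H ke := by rw [← hkeq]; rfl
    rw [hfst]
    exact hmin _ (List.mem_map_of_mem hkeE)
  have h2 : (q.getLast hq).1 ≤ m0 := by
    obtain ⟨ke0, hke0, hke0m⟩ := List.mem_map.mp hmem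
    have hin : pvPair H ke0 ∈ q := (hperm.mem_iff).mpr (List.mem_map_of_mem hke0)
    have := pvDesc_getLast_min q hdesc hq _ hin
    simpa [pvPair, hke0m] using this
  omega

lemma pvMapFst_bump (E : List (Int × Int)) (k : Int) :
    (E.map (fun p => if p.1 = k then (p.1, p.2 + 1) else p)).map Prod.fst = E.map Prod.fst := by
  rw [List.map_map]
  apply List.map_congr_left
  intro p _
  simp only [Function.comp_def]
  split <;> rfl

lemma pvMapNoop' (l : List (Int × Int)) (k : Int) (h : k ∉ l.map Prod.fst) :
    l.map (fun p => if p.1 = k then (p.1, p.2 + 1) else p) = l := by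
  have hcong : ∀ p ∈ l, (if p.1 = k then (p.1, p.2 + 1) else p) = id p := by
    intro p hp
    rw [if_neg (fun hpk => h (by rw [← hpk]; exact List.mem_map_of_mem hp))]
    rfl
  rw [List.map_congr_left hcong, List.map_id]

lemma pvModify_pointwise (E : List (Int × Int)) (k : Int)
    (hnd : (E.map Prod.fst).Nodup) (hk : k ∈ E.map Prod.fst) :
    (PySem.Dict.mk E).modify k 0 (· + 1) =
      PySem.Dict.mk (E.map (fun p => if p.1 = k then (p.1, p.2 + 1) else p)) := by
  obtain ⟨p, hp, hpk⟩ := List.mem_map.mp hk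
  obtain ⟨P, R, rfl⟩ := List.append_of_mem hp
  obtain ⟨k', e⟩ := p
  cases hpk
  rw [pvModify_mid P R k' e hnd]
  congr 1
  have hnd' := hnd
  simp only [List.map_append, List.map_cons, List.nodup_append, List.nodup_cons] at hnd'
  rw [List.map_append, List.map_cons]
  rw [pvMapNoop' P k' (fun hm => hnd'.2.2 _ hm _ (by simp) rfl),
      pvMapNoop' R k' hnd'.2.1.1]
  simp

lemma pvInnerB (h2 : List Int) :
    ∀ (L : List Int) (E : List (Int × Int)) (q2 : List (Int × Int)),
      (E.map Prod.fst).Nodup → L.Nodup → (∀ k ∈ L, k ∈ E.map Prod.fst) →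
      (∀ k ∈ L, ∀ y ∈ q2, y.2 ≠ k) → pvDesc q2 →
      (L.foldl (humbleAltInner h2) (PySem.Dict.mk E, q2)).1
          = PySem.Dict.mk (E.map (fun p => if p.1 ∈ L then (p.1, p.2 + 1) else p))
        ∧ pvDesc (L.foldl (humbleAltInner h2) (PySem.Dict.mk E, q2)).2
        ∧ (L.foldl (humbleAltInner h2) (PySem.Dict.mk E, q2)).2.Perm
            (q2 ++ L.map (fun k => (k * PySem.List.pyGetD h2 ((PySem.Dict.mk E).getD k 0 + 1) 0, k))) := by
  intro L
  induction L with
  | nil =>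
      intro E q2 hnd _ _ _ hdesc
      refine ⟨?_, hdesc, by simp⟩
      simp
  | cons k L ih =>
      intro E q2 hnd hLnd hLk hfresh hdesc
      have hkE : k ∈ E.map Prod.fst := hLk k (by simp)
      obtain ⟨p0, hp0, hp0k⟩ := List.mem_map.mp hkE
      obtain ⟨e, hke⟩ : ∃ e, (k, e) ∈ E := ⟨p0.2, by rw [← hp0k]; exact hp0⟩
      have hmod := pvModify_pointwise E k hnd hkE
      set E1 := E.map (fun p => if p.1 = k then (p.1, p.2 + 1) else p) with hE1
      have hE1fst : E1.map Prod.fst = E.map Prod.fst := pvMapFst_bump E k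
      have hgd1 : (PySem.Dict.mk E1).getD k 0 = e + 1 := by
        apply PySem.Dict.getD_of_mem_items
        · have hval : (fun p => if p.1 = k then (p.1, p.2 + 1) else p) ((k, e) : Int × Int)
              = ((k : Int), e + 1) := by simp
          have hmem := List.mem_map_of_mem (f := fun p => if p.1 = k then (p.1, p.2 + 1) else p) hke
          rw [hval] at hmem
          exact hmem
        · rw [pvMkKeys, hE1fst]; exact hnd
      have hgd0 : (PySem.Dict.mk E).getD k 0 = e :=
        PySem.Dict.getD_of_mem_items _ hke (by rw [pvMkKeys]; exact hnd) 0
      set x : Int × Int := (k * PySem.List.pyGetD h2 (e + 1) 0, k) with hxdef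
      have hins := pvInsort_spec q2 x hdesc
        (fun y hy => fun hyx => hfresh k (by simp) y hy (by rw [hyx]))
      -- one step of the fold
      have hstep : humbleAltInner h2 (PySem.Dict.mk E, q2) k = (PySem.Dict.mk E1, humbleInsort q2 x) := by
        unfold humbleAltInner
        simp only [hmod, hgd1, hxdef]
      rw [List.foldl_cons, hstep]
      have hknotL : k ∉ L := (List.nodup_cons.mp hLnd).1
      have ihres := ih E1 (humbleInsort q2 x)
        (by rw [hE1fst]; exact hnd)
        ((List.nodup_cons.mp hLnd).2)
        (fun k' hk' => by rw [hE1fst]; exact hLk k' (by simp [hk']))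
        (fun k' hk' y hy => by
          rcases List.mem_cons.mp ((hins.2.mem_iff).mp hy) with rfl | hyq
          · show x.2 ≠ k'
            intro hkk'
            exact hknotL (by simpa [hxdef, ← hkk'] using hk')
          · exact hfresh k' (by simp [hk']) y hyq)
        hins.1
      obtain ⟨ih1, ih2, ih3⟩ := ihres
      refine ⟨?_, ih2, ?_⟩
      · rw [ih1]
        congr 1
        rw [hE1, List.map_map]
        apply List.map_congr_left
        intro p hp
        simp only [Function.comp_def]
        by_cases hpk : p.1 = k
        · rw [if_pos hpk]
          have h1 : ¬ ((p.1, p.2 + 1) : Int × Int).1 ∈ L := by simpa [hpk] using hknotL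
          rw [if_neg h1, if_pos (by simp [hpk])]
        · rw [if_neg hpk]
          by_cases hpL : p.1 ∈ L
          · rw [if_pos hpL, if_pos (by simp [hpL])]
          · rw [if_neg hpL, if_neg (by simp [hpk, hpL])]
      · have hmapeq : L.map (fun k' => (k' * PySem.List.pyGetD h2 ((PySem.Dict.mk E1).getD k' 0 + 1) 0, k'))
            = L.map (fun k' => (k' * PySem.List.pyGetD h2 ((PySem.Dict.mk E).getD k' 0 + 1) 0, k')) := by
          apply List.map_congr_left
          intro k' hk'
          have hk'ne : k' ≠ k := fun h => hknotL (h ▸ hk')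
          obtain ⟨p', hp', hp'k⟩ := List.mem_map.mp (hLk k' (by simp [hk']))
          obtain ⟨e', hk'e⟩ : ∃ e', ((k' : Int), e') ∈ E := ⟨p'.2, by rw [← hp'k]; exact hp'⟩
          have hg1 : (PySem.Dict.mk E1).getD k' 0 = e' := by
            apply PySem.Dict.getD_of_mem_items
            · have hval : (fun p => if p.1 = k then (p.1, p.2 + 1) else p) ((k', e') : Int × Int)
                  = ((k' : Int), e') := by simp [hk'ne]
              have hmem := List.mem_map_of_mem (f := fun p => if p.1 = k then (p.1, p.2 + 1) else p) hk'e
              rw [hval] at hmem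
              exact hmem
            · rw [pvMkKeys, hE1fst]; exact hnd
          have hg0 : (PySem.Dict.mk E).getD k' 0 = e' :=
            PySem.Dict.getD_of_mem_items _ hk'e (by rw [pvMkKeys]; exact hnd) 0
          rw [hg1, hg0]
        rw [hmapeq] at ih3
        have hvk : ((k : Int) * PySem.List.pyGetD h2 ((PySem.Dict.mk E).getD k 0 + 1) 0, k) = x := by
          rw [hgd0]
        rw [List.map_cons, hvk]
        refine (ih3.trans (hins.2.append_right _)).trans ?_
        exact List.perm_middle.symm

def pvBInv (ks : List Int) (t : Nat)
    (st : List Int × PySem.Dict Int Int × List (Int × Int)) : Prop :=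
  st.1 = (pvIter ks t).2 ∧
  st.2.1 = PySem.Dict.mk (pvIter ks t).1 ∧
  pvDesc st.2.2 ∧
  st.2.2.Perm (((pvIter ks t).1).map (pvPair (pvIter ks t).2))

lemma pvKeyUnique (E : List (Int × Int)) (hnd : (E.map Prod.fst).Nodup)
    {a b : Int × Int} (ha : a ∈ E) (hb : b ∈ E) (hab : a.1 = b.1) : a = b :=
  List.inj_on_of_nodup_map hnd ha hb hab

lemma pvStepB (ks : List Int) (hnd : ks.Nodup) (hks : ks ≠ []) (t : Nat)
    (st : List Int × PySem.Dict Int Int × List (Int × Int))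
    (hst : pvBInv ks t st) (i : Int) : pvBInv ks (t + 1) (humbleAltStep st i) := by
  obtain ⟨h1, h2, hdesc, hperm⟩ := hst
  set E := (pvIter ks t).1 with hEdef
  set H := (pvIter ks t).2 with hHdef
  set q := st.2.2 with hqdef
  have hE : E.map Prod.fst = ks := pvIter_fst ks t
  have hH : H.length = t + 1 := pvIter_len ks t
  have hexp := pvIter_exp ks t
  have hEne : E ≠ [] := by
    intro h; rw [h] at hE; exact hks hE.symm
  have hqne : q ≠ [] := by
    intro h
    have h0 := hperm.length_eq
    rw [h] at h0
    simp only [List.length_nil, List.length_map] at h0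
    exact hEne (List.length_eq_zero_iff.mp h0.symm)
  -- the minimum
  have hm : (PySem.List.pyGetD q (-1) ((0 : Int), (0 : Int))).1 = pvM H E :=
    pvM_eq H E q hperm hdesc hEne
  set m := pvM H E with hmdef
  have hglast : (q.getLast hqne).1 = m := by
    rw [← hm, PySem.List.pyGetD_neg_one q _ hqne]
  have hmin : ∀ y ∈ q, m ≤ y.1 := by
    intro y hy
    rw [← hglast]
    exact pvDesc_getLast_min q hdesc hqne y hy
  -- split the queue at the run of minimal candidates
  set f : Int × Int → Bool := fun y => y.1 != m with hfdef
  set q1 := q.takeWhile f with hq1def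
  set r := q.dropWhile f with hrdef
  have hsplit : q1 ++ r = q := List.takeWhile_append_dropWhile
  have hq1 : ∀ y ∈ q1, y.1 ≠ m := by
    intro y hy
    have := List.mem_takeWhile_imp hy
    simpa [hfdef] using this
  have hr : ∀ y ∈ r, y.1 = m := by
    intro y hy
    rcases eq_or_ne r [] with hre | hrne
    · rw [hre] at hy; cases hy
    · have hhead : (r.head hrne).1 = m := by
        have := List.head_dropWhile_not f hrne
        simpa [hfdef] using this
      have hrdesc : pvDesc r := hdesc.sublist (List.dropWhile_sublist f)
      obtain ⟨j, hj, rfl⟩ := List.getElem_of_mem hy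
      have hhead' : r[0].1 = m := by
        rw [← List.head_eq_getElem hrne]; exact hhead
      cases Nat.eq_zero_or_pos j with
      | inl h0 => subst h0; exact hhead'
      | inr hpos =>
          have hlt := List.pairwise_iff_getElem.mp hrdesc 0 j (by omega) hj (by omega)
          rw [pvLt_iff] at hlt
          have hym : m ≤ r[j].1 :=
            hmin _ (by rw [← hsplit]; exact List.mem_append_right _ (List.getElem_mem hj))
          rcases hlt with hlt | hlt <;> omega
  have hrne : r ≠ [] := by
    intro hre
    have hq1all : ∀ y ∈ q, y.1 ≠ m := by
      intro y hy
      apply hq1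
      have hqq : q1 ++ r = q := hsplit
      rw [hre, List.append_nil] at hqq
      rwa [hqq]
    exact hq1all _ (List.getLast_mem hqne) hglast
  -- popRun computes (run primes, q1)
  have hpop : humblePopRun m q [] = ([] ++ r.reverse.map Prod.snd, q1) := by
    rw [← hsplit]
    exact pvPopRun_spec m r q1 []
      hr
      (fun y hy => hq1 y (List.mem_of_getLast? hy))
  set L := r.reverse.map Prod.snd with hLdef
  -- filter characterizations
  have hrfilter : r = q.filter (fun y => y.1 == m) := by
    rw [← hsplit, List.filter_append]
    rw [List.filter_eq_nil_iff.mpr (fun y hy => by simpa using hq1 y hy),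
        List.filter_eq_self.mpr (fun y hy => by simpa using hr y hy)]
    simp
  have hq1filter : q1 = q.filter (fun y => !(y.1 == m)) := by
    rw [← hsplit, List.filter_append]
    rw [List.filter_eq_self.mpr (fun y hy => by simpa using hq1 y hy),
        List.filter_eq_nil_iff.mpr (fun y hy => by simpa using hr y hy)]
    simp
  -- snd components
  have hsndfst : (E.map (pvPair H)).map Prod.snd = E.map Prod.fst := by
    rw [List.map_map]; rfl
  have hsnd_nodup : (q.map Prod.snd).Nodup := by
    refine (hperm.map Prod.snd).nodup_iff.mpr ?_
    rw [hsndfst, hE]; exact hnd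
  have hq1r_snd : (q1.map Prod.snd ++ r.map Prod.snd).Nodup := by
    rw [← List.map_append, hsplit]; exact hsnd_nodup
  have hLnd : L.Nodup := by
    rw [hLdef, List.map_reverse, List.nodup_reverse]
    rw [List.nodup_append] at hq1r_snd
    exact hq1r_snd.2.1
  have hLk : ∀ k ∈ L, k ∈ E.map Prod.fst := by
    intro k hk
    rw [hLdef] at hk
    obtain ⟨y, hy, rfl⟩ := List.mem_map.mp hk
    rw [List.mem_reverse] at hy
    have : y ∈ q := by rw [← hsplit]; exact List.mem_append_right _ hy
    have : y ∈ E.map (pvPair H) := hperm.mem_iff.mp this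
    obtain ⟨ke, hke, rfl⟩ := List.mem_map.mp this
    show ke.1 ∈ _
    exact List.mem_map_of_mem hke
  have hfresh : ∀ k ∈ L, ∀ y ∈ q1, y.2 ≠ k := by
    intro k hk y hy heq
    rw [hLdef] at hk
    obtain ⟨z, hz, rfl⟩ := List.mem_map.mp hk
    rw [List.mem_reverse] at hz
    rw [List.nodup_append] at hq1r_snd
    exact hq1r_snd.2.2 _ (List.mem_map_of_mem hy) _ (List.mem_map_of_mem hz) heq
  have hdescq1 : pvDesc q1 := hdesc.sublist (List.takeWhile_sublist f)
  -- the inner fold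
  have hinner := pvInnerB (H ++ [m]) L E q1 (by rw [hE]; exact hnd) hLnd hLk hfresh hdescq1
  -- the value of one outer step
  have hstepval : humbleAltStep st i
      = (H ++ [m],
         (L.foldl (humbleAltInner (H ++ [m])) (PySem.Dict.mk E, q1)).1,
         (L.foldl (humbleAltInner (H ++ [m])) (PySem.Dict.mk E, q1)).2) := by
    unfold humbleAltStep
    show (st.1 ++ [(PySem.List.pyGetD st.2.2 (-1) ((0:Int), (0:Int))).1],
      _, _) = _
    rw [show st.2.2 = q from rfl, hm, h1, h2, hpop]
    simp
  have hiter : pvIter ks (t + 1) = (E.map (pvUpd H m), H ++ [m]) := by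
    simp [pvIter, ← hEdef, ← hHdef, ← hmdef]
  -- the key/candidate correspondence on this step
  have hiff : ∀ ke ∈ E, (ke.1 ∈ L ↔ pvCand H ke = m) := by
    intro ke hke
    constructor
    · intro hkeL
      rw [hLdef] at hkeL
      obtain ⟨y, hy, hysnd⟩ := List.mem_map.mp hkeL
      rw [List.mem_reverse] at hy
      have hym : y.1 = m := hr y hy
      have hyq : y ∈ q := by rw [← hsplit]; exact List.mem_append_right _ hy
      obtain ⟨ke', hke', hke'y⟩ := List.mem_map.mp (hperm.mem_iff.mp hyq)
      have hkk : ke' = ke := by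
        apply pvKeyUnique E (by rw [hE]; exact hnd) hke' hke
        have : ke'.1 = y.2 := by rw [← hke'y]; rfl
        rw [this, hysnd]
      rw [← hkk] at *
      have : pvCand H ke' = y.1 := by rw [← hke'y]; rfl
      rw [this, hym]
    · intro hc
      have hpm : pvPair H ke ∈ q := hperm.mem_iff.mpr (List.mem_map_of_mem hke)
      have hfst : (pvPair H ke).1 = m := by rw [pvPair, hc]
      have hnotq1 : pvPair H ke ∉ q1 := fun hin => hq1 _ hin hfst
      have hinr : pvPair H ke ∈ r := by
        rcases List.mem_append.mp (hsplit ▸ hpm) with h | h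
        · exact absurd h hnotq1
        · exact h
      rw [hLdef, List.mem_map]
      exact ⟨pvPair H ke, by rw [List.mem_reverse]; exact hinr, rfl⟩
  rw [hstepval]
  refine ⟨by rw [hiter], ?_, hinner.2.1, ?_⟩
  · -- the exponent dictionary
    rw [hinner.1, hiter]
    congr 1
    apply List.map_congr_left
    intro ke hke
    unfold pvUpd
    by_cases hc : pvCand H ke = m
    · rw [if_pos ((hiff ke hke).mpr hc), if_pos hc]
    · rw [if_neg (fun hL => hc ((hiff ke hke).mp hL)), if_neg hc]
  · -- the queue permutation
    set c : Int × Int → Bool := fun ke => pvCand H ke == m with hcdef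
    set g : Int × Int → Int × Int := fun ke => pvPair (H ++ [m]) (pvUpd H m ke) with hgdef
    have hq1perm : q1.Perm ((E.filter (fun ke => !(c ke))).map (pvPair H)) := by
      rw [hq1filter]
      refine (hperm.filter _).trans ?_
      rw [List.filter_map]
      exact List.Perm.refl _
    have hrperm : r.Perm ((E.filter c).map (pvPair H)) := by
      rw [hrfilter]
      refine (hperm.filter _).trans ?_
      rw [List.filter_map]
      exact List.Perm.refl _
    have hLperm : L.Perm ((E.filter c).map Prod.fst) := by
      rw [hLdef, List.map_reverse]
      refine (List.reverse_perm _).trans ?_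
      have := hrperm.map Prod.snd
      rw [List.map_map] at this
      exact this
    have hgfilterc : ((E.filter c).map Prod.fst).map
        (fun k => (k * PySem.List.pyGetD (H ++ [m]) ((PySem.Dict.mk E).getD k 0 + 1) 0, k))
        = (E.filter c).map g := by
      rw [List.map_map]
      apply List.map_congr_left
      intro ke hke
      have hkeE : ke ∈ E := List.mem_of_mem_filter hke
      have hc : pvCand H ke = m := by
        have := List.of_mem_filter hke
        rw [hcdef] at this
        simpa using this
      have hgd : (PySem.Dict.mk E).getD ke.1 0 = ke.2 :=
        PySem.Dict.getD_of_mem_items _ (by exact hkeE) (by rw [pvMkKeys, hE]; exact hnd) 0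
      simp only [Function.comp_def]
      rw [hgd, hgdef]
      unfold pvUpd
      beta_reduce
      rw [if_pos hc]
      simp [pvPair, pvCand]
    have hq1g : (E.filter (fun ke => !(c ke))).map (pvPair H)
        = (E.filter (fun ke => !(c ke))).map g := by
      apply List.map_congr_left
      intro ke hke
      have hkeE : ke ∈ E := List.mem_of_mem_filter hke
      have hc : ¬ (pvCand H ke = m) := by
        have := List.of_mem_filter hke
        rw [hcdef] at this
        simpa using this
      have hex := hexp ke hkeE
      rw [hgdef]
      show pvPair H ke = pvPair (H ++ [m]) (pvUpd H m ke)
      rw [pvUpd, if_neg hc]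
      unfold pvPair
      rw [pvCand_prefix _ _ _ (by omega) (by omega)]
    have hEg : (E.map (pvUpd H m)).map (pvPair (H ++ [m])) = E.map g := by
      rw [List.map_map]; rfl
    rw [hiter]
    dsimp only
    refine hinner.2.2.trans ?_
    rw [hEg]
    refine List.Perm.trans (List.Perm.append hq1perm ((hLperm.map _).trans
      (by rw [hgfilterc]))) ?_
    rw [hq1g]
    refine (List.perm_append_comm).trans ?_
    have hpart := (List.filter_append_perm c E).map g
    rw [List.map_append] at hpart
    exact hpart

lemma pvLoopB (ks : List Int) (hnd : ks.Nodup) (hks : ks ≠ []) (N : Nat) :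
    ∀ d t (st : List Int × PySem.Dict Int Int × List (Int × Int)), t + d = N →
      pvBInv ks t st →
      pvBInv ks N ((PySem.List.pyRange (t : Int) (N : Int) 1).foldl humbleAltStep st) := by
  intro d
  induction d with
  | zero =>
      intro t st htd hst
      have : t = N := by omega
      subst this
      rw [PySem.List.pyRange_one_eq_nil (by omega)]
      exact hst
  | succ d ih =>
      intro t st htd hst
      rw [PySem.List.pyRange_one_cons (by omega), List.foldl_cons]
      have hstep := pvStepB ks hnd hks t st hst (t : Int)
      have := ih (t + 1) _ (by omega) hstep
      rw [show ((t + 1 : Nat) : Int) = (t : Int) + 1 by omega] at this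
      exact this

lemma pvInitQ :
    ∀ (l : List Int) (q : List (Int × Int)), pvDesc q →
      (∀ k ∈ l, ∀ y ∈ q, y.2 ≠ k) → l.Nodup →
      pvDesc (l.foldl (fun q p => humbleInsort q (p, p)) q) ∧
      (l.foldl (fun q p => humbleInsort q (p, p)) q).Perm (q ++ l.map (fun k => (k, k))) := by
  intro l
  induction l with
  | nil => intro q hdesc _ _; exact ⟨hdesc, by simp⟩
  | cons k l ih =>
      intro q hdesc hfresh hnd
      have hknotl : k ∉ l := (List.nodup_cons.mp hnd).1
      have hins := pvInsort_spec q (k, k) hdesc (fun y hy => hfresh k (by simp) y hy)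
      rw [List.foldl_cons]
      have ihres := ih (humbleInsort q (k, k)) hins.1
        (fun k' hk' y hy => by
          rcases List.mem_cons.mp ((hins.2.mem_iff).mp hy) with rfl | hyq
          · show (k, k).2 ≠ k'
            intro hkk'
            exact hknotl (by simpa [← hkk'] using hk')
          · exact hfresh k' (by simp [hk']) y hyq)
        ((List.nodup_cons.mp hnd).2)
      refine ⟨ihres.1, ?_⟩
      refine ihres.2.trans ?_
      rw [List.map_cons]
      refine ((hins.2.append_right _).trans ?_)
      exact List.perm_middle.symm


-- ===== VERDICT (by name: the statement is the Claim_ definition above) =====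
theorem humble_spec : Claim_equal_humble := by
  unfold Claim_equal_humble Spec_humble Pre_humble
  intro n primes _ hpre
  obtain ⟨hn0, hpr⟩ := hpre
  set N := n.toNat with hNdef
  have hnN : n = (N : Int) := by omega
  set ks := PySem.List.dedup primes with hksdef
  have hnd : ks.Nodup := PySem.List.nodup_dedup primes
  have hcand1 : ∀ k : Int, pvCand [1] (k, 0) = k := by
    intro k
    unfold pvCand
    rw [show PySem.List.pyGetD [(1 : Int)] 0 0 = 1 from rfl]
    ring
  by_cases hN0 : N = 0
  · have hn : n = 0 := by omega
    subst hn
    unfold humble humble_alt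
    rw [PySem.List.pyRange_one_eq_nil (by omega), PySem.List.pyRange_one_eq_nil (by omega)]
    simp only [List.foldl_nil]
    rfl
  · have hprne : primes ≠ [] := by
      rcases hpr with h | h
      · omega
      · exact h
    have hks : ks ≠ [] := by
      obtain ⟨p, ps, rfl⟩ := List.exists_cons_of_ne_nil hprne
      have : p ∈ ks := by
        rw [hksdef, PySem.List.dedup_eq_ofList, PySem.Set.mem_ofList]
        simp
      exact List.ne_nil_of_mem this
    -- ===== side A =====
    have hA : humble n primes = PySem.List.pyGetD ((pvIter ks N).2) (-1) 0 := by
      unfold humble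
      dsimp only
      have hinitA : (PySem.List.pyRepeat [(1 : Int)] (n + 1),
          primes.foldl (fun d p => d.insert p p) (PySem.Dict.mk []),
          primes.foldl (fun d p => d.insert p (0 : Int)) (PySem.Dict.mk [])) = pvAState ks N 0 := by
        unfold pvAState
        refine Prod.ext ?_ (Prod.ext ?_ ?_) <;> dsimp only
        · rw [PySem.List.pyRepeat_singleton]
          rw [show (n + 1).toNat = N + 1 by omega]
          rw [show (pvIter ks 0).2 = [1] from rfl]
          rw [List.replicate_succ]
          simp
        · rw [pvInitDict (fun p => p) primes]
          congr 1
          rw [show (pvIter ks 0).1 = ks.map (fun k => (k, 0)) from rfl,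
              show (pvIter ks 0).2 = [1] from rfl, List.map_map]
          apply List.map_congr_left
          intro k _
          simp [hcand1 k]
        · rw [pvInitDict (fun _ => (0 : Int)) primes]
          rfl
      rw [hinitA]
      have hloop := pvLoopA ks hnd N N 0 (by omega)
      rw [show ((0 : Nat) : Int) + 1 = (1 : Int) by norm_num] at hloop
      rw [hnN, hloop]
      unfold pvAState
      rw [Nat.sub_self, List.replicate_zero, List.append_nil]
    -- ===== side B =====
    have hB : humble_alt n primes = PySem.List.pyGetD ((pvIter ks N).2) (-1) 0 := by
      unfold humble_alt
      dsimp only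
      have hq0 := pvInitQ ks [] (by constructor) (by intro k _ y hy; cases hy) hnd
      have hinv0 : pvBInv ks 0
          ([(1 : Int)],
           ks.foldl (fun d p => d.insert p (0 : Int)) (PySem.Dict.mk []),
           ks.foldl (fun q p => humbleInsort q (p, p)) []) := by
        refine ⟨rfl, ?_, hq0.1, ?_⟩ <;> dsimp only
        · rw [pvInitDict (fun _ => (0 : Int)) ks]
          rw [show PySem.List.dedup ks = ks from ?_]
          · rfl
          · rw [PySem.List.dedup_eq_ofList]
            exact PySem.Set.ofList_eq_self_of_nodup ks hnd
        · refine hq0.2.trans ?_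
          rw [List.nil_append]
          rw [show (pvIter ks 0).1 = ks.map (fun k => (k, 0)) from rfl,
              show (pvIter ks 0).2 = [1] from rfl, List.map_map]
          apply List.Perm.of_eq
          apply List.map_congr_left
          intro k _
          simp [pvPair, hcand1 k]
      have hfin := pvLoopB ks hnd hks N N 0 _ (by omega) hinv0
      rw [show ((0 : Nat) : Int) = (0 : Int) by norm_num] at hfin
      rw [hnN, hfin.1]
    rw [hA, hB]
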